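-- pv_equiv track=rewrite | github.com/yatsky/demyst-parse-fixed-width-file | main.py | _parse_fixed_length_line
-- ===== SOURCE A (Python) =====
-- def _parse_fixed_length_line(line: str, offsets: list[int]) -> list[str]:
--     parsed_data = []
--     cur_pos = 0
--
--     for length in offsets:
--         field_data = line[cur_pos : cur_pos + length].strip()
--         parsed_data.append(field_data)
--
--         cur_pos += length
--
--     return parsed_data
-- ===== SOURCE B (Python) =====
-- def _parse_fixed_length_line(line: str, offsets: list[int]) -> list[str]:
--     def parse(base, offs):
--         n = len(offs)
--         if n == 0:
--             return []
--         if n == 1: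
--             return [line[base:base + offs[0]].strip()]
--         mid = n // 2
--         return parse(base, offs[:mid]) + parse(base + sum(offs[:mid]), offs[mid:])
--     return parse(0, offsets)
-- ===== Notes on version B (the rewrite author's own statement) =====
-- stated objective: alternative
-- what changed: B parses by divide and conquer: it halves the offsets table and recurses on the two halves, carrying an absolute base cursor shifted by the left half's total width, instead of A's single cursor-advancing loop with an accumulator.
import Mathlib
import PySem

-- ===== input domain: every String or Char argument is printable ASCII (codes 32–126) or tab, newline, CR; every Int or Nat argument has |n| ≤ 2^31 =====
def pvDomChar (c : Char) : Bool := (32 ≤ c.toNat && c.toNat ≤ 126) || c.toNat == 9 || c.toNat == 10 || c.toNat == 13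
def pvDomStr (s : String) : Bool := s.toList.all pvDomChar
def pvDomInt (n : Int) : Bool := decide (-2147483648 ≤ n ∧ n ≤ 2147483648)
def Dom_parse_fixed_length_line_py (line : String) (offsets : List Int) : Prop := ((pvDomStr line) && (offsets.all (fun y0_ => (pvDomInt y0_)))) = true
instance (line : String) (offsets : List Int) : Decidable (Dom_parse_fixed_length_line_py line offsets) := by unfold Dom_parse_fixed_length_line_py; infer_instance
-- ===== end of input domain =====

-- B parses by divide and conquer: it halves the offsets table and recurses on the two halves,
-- carrying an absolute base cursor (the left half's total width is added for the right half),
-- instead of A's single cursor-advancing loop (objective: alternative).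


-- ===== PORT A =====
-- for length in offsets: append line[cur:cur+length].strip(); cur += length
def parse_fixed_length_line_py (line : String) (offsets : List Int) : List String :=
  (offsets.foldl
    (fun (st : Int × List String) length =>
      let field_data := PySem.Str.strip (PySem.Str.slice line (some st.1) (some (st.1 + length)))
      (st.1 + length, st.2 ++ [field_data]))
    (0, [])).2

-- ===== PORT B =====
-- inner helper `parse(base, offs)`: divide and conquer on the offsets, splitting at mid = n // 2
-- and adding the left half's total width to the base cursor for the right half
-- (mid = n // 2 on the Nat length is exactly Python's len(offs) // 2, which is never negative)
def pvParse (line : String) (base : Int) (offs : List Int) : List String :=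
  match offs with
  | [] => []
  | [w] => [PySem.Str.strip (PySem.Str.slice line (some base) (some (base + w)))]
  | w1 :: w2 :: rest =>
      let offs' := w1 :: w2 :: rest
      let mid := offs'.length / 2
      pvParse line base (offs'.take mid) ++
      pvParse line (base + (offs'.take mid).sum) (offs'.drop mid)
termination_by offs.length
decreasing_by
  · simp; omega
  · simp; omega

def parse_fixed_length_line_py_alt (line : String) (offsets : List Int) : List String :=
  pvParse line 0 offsets

-- ===== PRECONDITION & SPEC =====
def Spec_parse_fixed_length_line_py (line : String) (offsets : List Int) (out : List String) : Prop := out = parse_fixed_length_line_py_alt line offsets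
instance (line : String) (offsets : List Int) (out : List String) : Decidable (Spec_parse_fixed_length_line_py line offsets out) := by unfold Spec_parse_fixed_length_line_py; infer_instance

-- ===== CLAIM (what is proved, stated in full; the proofs are below) =====
def Claim_equal_parse_fixed_length_line_py : Prop := ∀ (line : String) (offsets : List Int), Dom_parse_fixed_length_line_py line offsets → Spec_parse_fixed_length_line_py line offsets (parse_fixed_length_line_py line offsets)

-- ===== LEMMAS AND PROOFS =====

-- the fields starting from cursor `cur`: common characterization of both ports
def pvFields (line : String) : Int → List Int → List String
  | _, [] => []
  | cur, l :: ls =>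
      PySem.Str.strip (PySem.Str.slice line (some cur) (some (cur + l))) :: pvFields line (cur + l) ls

theorem pvA_eq_fields (line : String) (offs : List Int) :
    ∀ (cur : Int) (acc : List String),
      (offs.foldl
        (fun (st : Int × List String) length =>
          let field_data := PySem.Str.strip (PySem.Str.slice line (some st.1) (some (st.1 + length)))
          (st.1 + length, st.2 ++ [field_data]))
        (cur, acc)).2 = acc ++ pvFields line cur offs := by
  induction offs with
  | nil => intro cur acc; simp [pvFields]
  | cons l ls ih =>
      intro cur acc
      simp only [List.foldl_cons, pvFields]
      rw [ih]
      simp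

-- splitting the offsets splits the fields, shifting the cursor by the left part's total width
theorem pvFields_append (line : String) (xs : List Int) :
    ∀ (ys : List Int) (base : Int),
      pvFields line base (xs ++ ys)
        = pvFields line base xs ++ pvFields line (base + xs.sum) ys := by
  induction xs with
  | nil => intro ys base; simp [pvFields]
  | cons w xs ih =>
      intro ys base
      simp only [List.cons_append, pvFields, List.cons_append]
      rw [ih ys (base + w)]
      have h : base + w + xs.sum = base + (w + xs.sum) := by ring
      simp [h]

-- B's recursion computes the cursor fields; fuel induction on the length of the offsets
theorem pvParse_eq_fields : ∀ (n : Nat) (offs : List Int), offs.length ≤ n →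
    ∀ (line : String) (base : Int), pvParse line base offs = pvFields line base offs := by
  intro n
  induction n with
  | zero =>
      intro offs hlen line base
      have : offs = [] := List.eq_nil_of_length_eq_zero (Nat.le_zero.mp hlen)
      subst this
      simp [pvParse, pvFields]
  | succ n ih =>
      intro offs hlen line base
      match offs with
      | [] => simp [pvParse, pvFields]
      | [w] => simp [pvParse, pvFields]
      | w1 :: w2 :: rest =>
          rw [pvParse]
          have hlen' : rest.length + 2 ≤ n + 1 := by simpa using hlen
          rw [ih _ (by simp; omega), ih _ (by simp; omega)]
          have := pvFields_append line ((w1 :: w2 :: rest).take ((w1 :: w2 :: rest).length / 2))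
            ((w1 :: w2 :: rest).drop ((w1 :: w2 :: rest).length / 2)) base
          rw [List.take_append_drop] at this
          exact this.symm

-- ===== VERDICT (by name: the statement is the Claim_ definition above) =====
theorem parse_fixed_length_line_py_spec : Claim_equal_parse_fixed_length_line_py := by
  intro line offsets _
  unfold Spec_parse_fixed_length_line_py parse_fixed_length_line_py parse_fixed_length_line_py_alt
  rw [pvA_eq_fields line offsets 0 [], List.nil_append,
      pvParse_eq_fields offsets.length offsets le_rfl line 0]
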